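-- pv_equiv track=rewrite | github.com/jmcguigs/startracker | tests/derivitive_wrapper_tb.py | calculate_deriviative
-- ===== SOURCE A (Python) =====
-- def calculate_deriviative(values):
--     dy = []
--     for i in range(len(values)):
--         if(i == 0):
--             dy.append(0)
--         else:
--             dy.append(values[i] - values[i-1])
--     return dy
-- ===== SOURCE B (Python) =====
-- def calculate_deriviative(values):
--     # shift-and-subtract: pair each element with its predecessor (the first
--     # element with itself, so the first difference is 0) and subtract.
--     shifted = values[:1] + values[:-1]
--     return list(map(lambda v, p: v - p, values, shifted))
-- ===== Notes on version B (the rewrite author's own statement) =====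
-- stated objective: alternative
-- what changed: Replaces the guarded index loop by shift-and-subtract: build the predecessor list values[:1] + values[:-1] in a separate pass and subtract it elementwise from values, so there is no i==0 guard and no empty-list special case.
import Mathlib
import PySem

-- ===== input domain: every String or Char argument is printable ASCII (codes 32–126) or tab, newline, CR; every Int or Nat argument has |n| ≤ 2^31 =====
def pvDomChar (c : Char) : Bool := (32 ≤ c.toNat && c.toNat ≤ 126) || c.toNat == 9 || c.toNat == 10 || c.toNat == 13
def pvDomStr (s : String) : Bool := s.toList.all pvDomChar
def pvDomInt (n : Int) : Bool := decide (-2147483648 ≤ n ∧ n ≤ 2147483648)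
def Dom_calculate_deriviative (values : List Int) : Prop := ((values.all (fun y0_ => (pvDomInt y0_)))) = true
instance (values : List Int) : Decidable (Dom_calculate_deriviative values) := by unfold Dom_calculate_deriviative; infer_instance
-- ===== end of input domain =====

-- B computes the differences by shift-and-subtract: it builds the predecessor list
-- values[:1] + values[:-1] and subtracts it elementwise from values; same return values.
-- ===== PORT A =====
def calculate_deriviative (values : List Int) : List Int :=
  (PySem.List.pyRange 0 (values.length : Int) 1).foldl
    (fun dy i =>
      if i == 0 then dy ++ [0]
      else dy ++ [PySem.List.pyGetD values i 0 - PySem.List.pyGetD values (i - 1) 0])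
    []

-- ===== PORT B =====
def calculate_deriviative_alt (values : List Int) : List Int :=
  let shifted := PySem.List.slice values none (some 1) ++ PySem.List.slice values none (some (-1))
  List.zipWith (fun v p => v - p) values shifted

-- ===== PRECONDITION & SPEC =====
def Spec_calculate_deriviative (values : List Int) (out : List Int) : Prop := out = calculate_deriviative_alt values
instance (values : List Int) (out : List Int) : Decidable (Spec_calculate_deriviative values out) := by unfold Spec_calculate_deriviative; infer_instance

-- ===== CLAIM (what is proved, stated in full; the proofs are below) =====
def Claim_equal_calculate_deriviative : Prop := ∀ (values : List Int), Dom_calculate_deriviative values → Spec_calculate_deriviative values (calculate_deriviative values)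

-- ===== LEMMAS AND PROOFS =====

theorem a_eq_map (values : List Int) :
    calculate_deriviative values =
      (PySem.List.pyRange 0 (values.length : Int) 1).map
        (fun i => if i == 0 then 0
          else PySem.List.pyGetD values i 0 - PySem.List.pyGetD values (i - 1) 0) := by
  unfold calculate_deriviative
  have hf : (fun (dy : List Int) (i : Int) =>
      if i == 0 then dy ++ [0]
      else dy ++ [PySem.List.pyGetD values i 0 - PySem.List.pyGetD values (i - 1) 0])
      = (fun dy i => dy ++ [if i == 0 then 0
          else PySem.List.pyGetD values i 0 - PySem.List.pyGetD values (i - 1) 0]) := by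
    funext dy i
    split <;> rfl
  rw [hf, PySem.List.foldl_append_singleton_eq_map, List.nil_append]

theorem b_shifted (values : List Int) :
    calculate_deriviative_alt values =
      List.zipWith (fun v p => v - p) values (values.take 1 ++ values.dropLast) := by
  unfold calculate_deriviative_alt
  rw [PySem.List.slice_to_neg_one,
    show (1 : Int) = ((1 : Nat) : Int) from rfl, PySem.List.slice_to_natCast]

theorem a_eq_b (values : List Int) :
    calculate_deriviative values = calculate_deriviative_alt values := by
  rw [a_eq_map, b_shifted]
  cases values with
  | nil => rfl
  | cons x xs =>
    apply List.ext_getElem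
    · simp [PySem.List.length_pyRange_one]
    · intro k h1 h2
      simp only [List.length_map, PySem.List.length_pyRange_one] at h1
      rw [List.getElem_map, PySem.List.getElem_pyRange_one]
      rw [List.getElem_zipWith]
      cases k with
      | zero => simp
      | succ m =>
        have hm : m + 1 < (x :: xs).length := by omega
        have h1' : ((m + 1 : Nat) : Int) ≠ 0 := by omega
        simp only [zero_add]
        rw [if_neg (by simpa using h1')]
        have e1 : PySem.List.pyGetD (x :: xs) ((m + 1 : Nat) : Int) 0 = (x :: xs)[m + 1] := by
          rw [PySem.List.pyGetD_natCast, List.getD_eq_getElem _ _ hm]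
        have ec : ((m + 1 : Nat) : Int) - 1 = ((m : Nat) : Int) := by push_cast; ring
        have e2 : PySem.List.pyGetD (x :: xs) (((m + 1 : Nat) : Int) - 1) 0 = (x :: xs)[m] := by
          rw [ec, PySem.List.pyGetD_natCast, List.getD_eq_getElem _ _ (by omega)]
        rw [e1, e2]
        simp [List.getElem_append, List.getElem_dropLast]

-- ===== VERDICT (by name: the statement is the Claim_ definition above) =====
theorem calculate_deriviative_spec : Claim_equal_calculate_deriviative := by
  intro values _
  unfold Spec_calculate_deriviative
  exact a_eq_b values
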